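-- pv_equiv track=rewrite | github.com/afxdkdb/LAVAD | scripts/evaluate_ucfcrime.py | get_video_labels
-- ===== SOURCE A (Python) =====
-- def get_video_labels(annotation_line, num_frames):
--     parts = annotation_line.strip().split()
--     if len(parts) < 4:
--         return [0] * num_frames
--
--     labels = []
--     start_idx = int(parts[1])
--     end_idx = int(parts[2])
--     label = int(parts[3])
--
--     for i in range(num_frames):
--         if start_idx <= i <= end_idx:
--             labels.append(label)
--         else:
--             labels.append(0)
--     return labels
-- ===== SOURCE B (Python) =====
-- def get_video_labels(annotation_line, num_frames):
--     parts = annotation_line.strip().split()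
--     if len(parts) < 4:
--         return [0] * num_frames
--     labels = [0] * num_frames
--     lo = max(int(parts[1]), 0)
--     hi = min(int(parts[2]), num_frames - 1)
--     if lo <= hi:
--         labels[lo:hi + 1] = [int(parts[3])] * (hi - lo + 1)
--     return labels
-- ===== Notes on version B (the rewrite author's own statement) =====
-- stated objective: simpler
-- what changed: Replaces A's per-frame loop with its range test by clipping the annotated range once and overwriting one slice of a zero-filled list.
import Mathlib
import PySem

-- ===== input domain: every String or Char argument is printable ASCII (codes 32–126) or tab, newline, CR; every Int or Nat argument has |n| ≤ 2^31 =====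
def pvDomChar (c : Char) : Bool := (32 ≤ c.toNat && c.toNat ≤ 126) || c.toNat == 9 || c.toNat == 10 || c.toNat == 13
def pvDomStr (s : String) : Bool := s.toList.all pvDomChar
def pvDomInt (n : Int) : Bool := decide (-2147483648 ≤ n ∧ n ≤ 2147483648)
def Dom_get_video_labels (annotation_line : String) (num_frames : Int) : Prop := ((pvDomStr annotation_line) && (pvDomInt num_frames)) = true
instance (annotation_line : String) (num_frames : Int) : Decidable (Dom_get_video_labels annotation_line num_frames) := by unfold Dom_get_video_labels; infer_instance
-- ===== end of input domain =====

-- B replaces A's per-frame loop with one slice overwrite of a zero-filled list (simpler decomposition).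

-- ===== PORT A =====
def get_video_labels (annotation_line : String) (num_frames : Int) : List Int :=
  let parts := PySem.Str.split₀ (PySem.Str.strip annotation_line)
  if parts.length < 4 then PySem.List.pyRepeat [(0 : Int)] num_frames
  else
    let start_idx := (PySem.Int.ofStr? (PySem.List.pyGetD parts 1 "")).getD 0
    let end_idx := (PySem.Int.ofStr? (PySem.List.pyGetD parts 2 "")).getD 0
    let label := (PySem.Int.ofStr? (PySem.List.pyGetD parts 3 "")).getD 0
    (PySem.List.pyRange 0 num_frames 1).foldl
      (fun labels i => labels ++ [if start_idx ≤ i ∧ i ≤ end_idx then label else 0]) []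

-- ===== PORT B =====
def get_video_labels_alt (annotation_line : String) (num_frames : Int) : List Int :=
  let parts := PySem.Str.split₀ (PySem.Str.strip annotation_line)
  if parts.length < 4 then List.replicate num_frames.toNat (0 : Int)
  else
    let labels := List.replicate num_frames.toNat (0 : Int)
    let lo := max ((PySem.Int.ofStr? (PySem.List.pyGetD parts 1 "")).getD 0) 0
    let hi := min ((PySem.Int.ofStr? (PySem.List.pyGetD parts 2 "")).getD 0) (num_frames - 1)
    if lo ≤ hi then
      labels.take lo.toNat
        ++ List.replicate (hi - lo + 1).toNat ((PySem.Int.ofStr? (PySem.List.pyGetD parts 3 "")).getD 0)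
        ++ labels.drop (hi + 1).toNat
    else labels

-- ===== PRECONDITION & SPEC =====
-- Pre_ excludes exactly the inputs where A raises ValueError: 4+ whitespace-separated
-- tokens whose 2nd, 3rd or 4th token is not int()-parseable.
def Pre_get_video_labels (annotation_line : String) (num_frames : Int) : Prop :=
  let parts := PySem.Str.split₀ (PySem.Str.strip annotation_line)
  parts.length < 4 ∨
    ((PySem.Int.ofStr? (parts.getD 1 "")).isSome = true ∧
     (PySem.Int.ofStr? (parts.getD 2 "")).isSome = true ∧
     (PySem.Int.ofStr? (parts.getD 3 "")).isSome = true)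
instance (annotation_line : String) (num_frames : Int) : Decidable (Pre_get_video_labels annotation_line num_frames) := by unfold Pre_get_video_labels; infer_instance

def pvWitness_get_video_labels : String × Int := ("vid 2 5 1", 8)

def Spec_get_video_labels (annotation_line : String) (num_frames : Int) (out : List Int) : Prop := out = get_video_labels_alt annotation_line num_frames
instance (annotation_line : String) (num_frames : Int) (out : List Int) : Decidable (Spec_get_video_labels annotation_line num_frames out) := by unfold Spec_get_video_labels; infer_instance

-- ===== CLAIM (what is proved, stated in full; the proofs are below) =====
def Claim_equal_get_video_labels : Prop := ∀ (annotation_line : String) (num_frames : Int), Dom_get_video_labels annotation_line num_frames → Pre_get_video_labels annotation_line num_frames → Spec_get_video_labels annotation_line num_frames (get_video_labels annotation_line num_frames)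

-- ===== LEMMAS AND PROOFS =====

-- A's per-frame map over range(n) equals B's three-piece slice picture.
lemma map_range_ite_eq_slice (n a b L : Int) :
    (PySem.List.pyRange 0 n 1).map (fun i => if a ≤ i ∧ i ≤ b then L else 0)
      = if max a 0 ≤ min b (n - 1) then
          (List.replicate n.toNat (0 : Int)).take (max a 0).toNat
            ++ List.replicate (min b (n - 1) - max a 0 + 1).toNat L
            ++ (List.replicate n.toNat (0 : Int)).drop (min b (n - 1) + 1).toNat
        else List.replicate n.toNat 0 := by
  rw [List.take_replicate, List.drop_replicate]
  apply List.ext_getElem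
  · simp [PySem.List.length_pyRange_one]
    split_ifs <;> simp <;> omega
  · intro k h1 h2
    simp only [List.getElem_map, PySem.List.getElem_pyRange_one, zero_add]
    have hk : (k : Int) < n := by
      simp [PySem.List.length_pyRange_one] at h1; omega
    by_cases hcond : max a 0 ≤ min b (n - 1)
    · simp only [hcond, if_true, List.getElem_append, List.getElem_replicate,
        List.length_replicate]
      split_ifs <;>
        first
          | rfl
          | (simp only [List.length_append, List.length_replicate] at *; omega)
    · simp only [hcond, if_false, List.getElem_replicate]
      have : ¬ (a ≤ (k : Int) ∧ (k : Int) ≤ b) := by omega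
      simp [this]

-- ===== VERDICT (by name: the statement is the Claim_ definition above) =====
theorem get_video_labels_spec : Claim_equal_get_video_labels := by
  intro s n _ _
  unfold Spec_get_video_labels get_video_labels get_video_labels_alt
  simp only []
  by_cases h : (PySem.Str.split₀ (PySem.Str.strip s)).length < 4
  · simp [h, PySem.List.pyRepeat_singleton]
  · simp only [h, if_false]
    rw [PySem.List.foldl_append_singleton_eq_map, map_range_ite_eq_slice]
    simp only [List.nil_append, List.take_replicate, List.drop_replicate]
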